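-- pv_equiv track=rewrite | github.com/Zonotora/adventofcode | 2015/python/10.py | compute
-- ===== SOURCE A (Python) =====
-- def compute(items):
--     cnt = []
--     current = None
--     for c in items:
--         if current is None:
--             current = (c, 1)
--         elif current[0] == c:
--             current = (c, current[1] + 1)
--         else:
--             cnt.append(current)
--             current = (c, 1)
--     if current is not None:
--         cnt.append(current)
--
--     s = ""
--     for c, v in cnt:
--         s += f"{v}{c}"
--
--     return s
-- ===== SOURCE B (Python) =====
-- def compute(items):
--     parts = []
--     i = 0
--     n = len(items)
--     while i < n:
--         j = i
--         while j < n and items[j] == items[i]: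
--             j += 1
--         parts.append(f"{j - i}{items[i]}")
--         i = j
--     return "".join(parts)
-- ===== Notes on version B (the rewrite author's own statement) =====
-- stated objective: idiomatic
-- what changed: Replaces the current/cnt run-tracking state machine (intermediate list of pairs, then a second rendering loop) with a single two-pointer scan that emits each run's encoding directly and joins the parts.
import Mathlib
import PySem

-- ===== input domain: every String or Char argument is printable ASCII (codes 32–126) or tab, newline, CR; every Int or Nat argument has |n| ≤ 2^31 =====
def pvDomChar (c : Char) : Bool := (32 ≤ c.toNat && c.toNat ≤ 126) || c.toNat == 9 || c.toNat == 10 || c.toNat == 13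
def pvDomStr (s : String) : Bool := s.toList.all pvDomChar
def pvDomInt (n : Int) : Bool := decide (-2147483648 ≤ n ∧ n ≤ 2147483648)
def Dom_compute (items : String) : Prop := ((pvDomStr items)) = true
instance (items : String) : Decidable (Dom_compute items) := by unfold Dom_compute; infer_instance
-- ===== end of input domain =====

-- B replaces A's current/cnt run-tracking state machine (intermediate pair list, second rendering loop)
-- with a single two-pointer scan that emits each run's encoding directly and joins the parts.

-- ===== PORT A =====
-- one step of A's for-loop: state = (cnt, current)
def computeStep (st : List (Char × Int) × Option (Char × Int)) (c : Char) :
    List (Char × Int) × Option (Char × Int) :=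
  match st.2 with
  | none => (st.1, some (c, 1))
  | some cur =>
    if cur.1 == c then (st.1, some (c, cur.2 + 1))
    else (st.1 ++ [cur], some (c, 1))

-- the final `if current is not None: cnt.append(current)`
def computeFlush (st : List (Char × Int) × Option (Char × Int)) : List (Char × Int) :=
  match st.2 with
  | none => st.1
  | some cur => st.1 ++ [cur]

def compute (items : String) : String :=
  (computeFlush (items.toList.foldl computeStep ([], none))).foldl
    (fun s p => s ++ PySem.Int.toStr p.2 ++ String.mk [p.1]) ""

-- ===== PORT B =====
-- B's inner `while items[j] == items[i]` run scan, ported as the standard span (takeWhile/dropWhile)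
def computeAltGo : List Char → List String
  | [] => []
  | c :: rest =>
    (PySem.Int.toStr (((rest.takeWhile (· == c)).length : Int) + 1) ++ String.mk [c])
      :: computeAltGo (rest.dropWhile (· == c))
termination_by l => l.length
decreasing_by
  simp only [List.length_cons]
  exact Nat.lt_succ_of_le (List.length_dropWhile_le _ _)

def compute_alt (items : String) : String :=
  String.join (computeAltGo items.toList)

-- ===== PRECONDITION & SPEC =====
def Spec_compute (items : String) (out : String) : Prop := out = compute_alt items
instance (items : String) (out : String) : Decidable (Spec_compute items out) := by unfold Spec_compute; infer_instance

-- ===== CLAIM (what is proved, stated in full; the proofs are below) =====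
def Claim_equal_compute : Prop := ∀ (items : String), Dom_compute items → Spec_compute items (compute items)

-- ===== LEMMAS AND PROOFS =====

-- the run list A accumulates, characterised recursively from the current run (c, k)
def runsFrom (c : Char) (k : Int) : List Char → List (Char × Int)
  | [] => [(c, k)]
  | d :: rest => if c == d then runsFrom c (k + 1) rest else (c, k) :: runsFrom d 1 rest

-- A's loop from state (acc, some (c,k)), after flushing the final current, yields acc ++ runsFrom c k l
theorem foldl_computeStep (l : List Char) (acc : List (Char × Int)) (c : Char) (k : Int) :
    computeFlush (l.foldl computeStep (acc, some (c, k))) = acc ++ runsFrom c k l := by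
  induction l generalizing acc c k with
  | nil => simp [computeFlush, runsFrom]
  | cons d rest ih =>
    simp only [List.foldl_cons, computeStep, runsFrom]
    by_cases h : c = d
    · simp [h, ih]
    · have hb : (c == d) = false := by simp [h]
      simp only [hb, Bool.false_eq_true, if_false]
      rw [ih]
      simp

-- runsFrom merges the leading run of c's into (c, k + len) and then proceeds per run
theorem runsFrom_span (c : Char) (k : Int) (l : List Char) :
    runsFrom c k l =
      (c, k + ((l.takeWhile (· == c)).length : Int)) ::
        (match l.dropWhile (· == c) with
         | [] => []
         | d :: rest => runsFrom d 1 rest) := by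
  induction l generalizing k with
  | nil => simp [runsFrom]
  | cons d rest ih =>
    by_cases h : d = c
    · subst h
      rw [show runsFrom d k (d :: rest) = runsFrom d (k + 1) rest by simp [runsFrom]]
      rw [ih]
      simp only [List.takeWhile_cons, List.dropWhile_cons, beq_self_eq_true, if_true,
        List.length_cons]
      congr 2
      push_cast
      ring
    · have hb : (d == c) = false := by simp [h]
      have hb' : (c == d) = false := by simp only [beq_eq_false_iff_ne]; exact Ne.symm h
      simp [runsFrom, hb, hb']

-- rendering: A's second foldl over a run list equals B's join of per-run strings
def renderRun (p : Char × Int) : String := PySem.Int.toStr p.2 ++ String.mk [p.1]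

theorem join_cons (a : String) (l : List String) :
    String.join (a :: l) = a ++ String.join l := by
  have key : ∀ (l : List String) (r : String),
      l.foldl (· ++ ·) r = r ++ l.foldl (· ++ ·) "" := by
    intro l
    induction l with
    | nil => simp
    | cons b l ih => intro r; simp only [List.foldl_cons]; rw [ih, ih ("" ++ b)]; simp [String.append_assoc]
  simp only [String.join, List.foldl_cons]
  rw [key l ("" ++ a)]
  simp

theorem foldl_render (cnt : List (Char × Int)) (s : String) :
    cnt.foldl (fun s p => s ++ PySem.Int.toStr p.2 ++ String.mk [p.1]) s =
      s ++ String.join (cnt.map renderRun) := by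
  induction cnt generalizing s with
  | nil => simp [String.join]
  | cons p rest ih =>
    simp only [List.foldl_cons, List.map_cons, join_cons]
    rw [ih]
    simp [renderRun, String.append_assoc]

-- the run list matches B's recursion, rendered run by run (induction on a length bound)
theorem runsFrom_render (n : Nat) : ∀ (c : Char) (rest : List Char), rest.length ≤ n →
    String.join ((runsFrom c 1 rest).map renderRun) = String.join (computeAltGo (c :: rest)) := by
  induction n with
  | zero =>
    intro c rest h
    have : rest = [] := List.eq_nil_of_length_eq_zero (Nat.le_zero.mp h)
    subst this
    simp [runsFrom, computeAltGo, renderRun, join_cons]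
  | succ n ih =>
    intro c rest h
    rw [runsFrom_span]
    simp only [computeAltGo, List.map_cons, join_cons, renderRun]
    rw [show (1 : Int) + ((rest.takeWhile (· == c)).length : Int)
          = ((rest.takeWhile (· == c)).length : Int) + 1 by ring]
    congr 1
    cases hd : rest.dropWhile (· == c) with
    | nil => simp [String.join, computeAltGo]
    | cons d r =>
      have hlen : r.length ≤ n := by
        have h1 : (d :: r).length ≤ rest.length := hd ▸ List.length_dropWhile_le _ _
        simp only [List.length_cons] at h1
        omega
      exact ih d r hlen

-- ===== VERDICT (by name: the statement is the Claim_ definition above) =====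
theorem compute_spec : Claim_equal_compute := by
  intro items _
  unfold Spec_compute compute compute_alt
  cases h : items.toList with
  | nil => simp [computeFlush, String.join, computeAltGo]
  | cons c rest =>
    simp only [List.foldl_cons, computeStep]
    rw [foldl_computeStep rest [] c 1, List.nil_append, foldl_render]
    rw [runsFrom_render rest.length c rest (Nat.le_refl _)]
    simp
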